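-- pv_equiv track=rewrite | github.com/KeshiChen/Treasure-Hunter | Raft.py | get_view
-- ===== SOURCE A (Python) =====
-- def get_view(data):
--     view = [[' ']*5 for _ in range(5)]
--     n = 0
--     for i in range(5):
--         for j in range(5):
--             if not i == 2 and j == 2:
--                 try:
--                     view[i][j] = data[n]
--                     n += 1
--                 except IndexError:
--                     pass
--     return view
-- ===== SOURCE B (Python) =====
-- def get_view(data):
--     view = [[' '] * 5 for _ in range(5)]
--     for idx, row in enumerate((0, 1, 3, 4)):
--         if idx < len(data):
--             view[row][2] = data[idx]
--     return view
-- ===== Notes on version B (the rewrite author's own statement) =====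
-- stated objective: simpler
-- what changed: B replaces the 25-cell nested scan with branch-and-try by a direct pass over the four written cells (rows 0,1,3,4 at column 2), assigning data[idx] under a simple length guard.
import Mathlib
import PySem

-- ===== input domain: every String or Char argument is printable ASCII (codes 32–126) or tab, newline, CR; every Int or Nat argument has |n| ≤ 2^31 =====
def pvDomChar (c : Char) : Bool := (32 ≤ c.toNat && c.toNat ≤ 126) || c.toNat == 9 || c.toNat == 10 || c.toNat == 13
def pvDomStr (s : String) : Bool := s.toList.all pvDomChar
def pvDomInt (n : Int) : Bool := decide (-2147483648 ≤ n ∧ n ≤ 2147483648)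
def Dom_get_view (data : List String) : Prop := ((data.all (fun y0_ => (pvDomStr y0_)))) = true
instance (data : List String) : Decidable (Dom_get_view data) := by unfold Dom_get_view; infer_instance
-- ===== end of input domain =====

-- B writes only the four cells A ever writes (column 2 of rows 0,1,3,4) instead of scanning all 25 cells; objective: simpler.

-- ===== PORT A =====
-- view[i][j] = s  (i, j are the loop indices of A, always 0..4 here)
def pvSetCell (v : List (List String)) (i j : Int) (s : String) : List (List String) :=
  v.set i.toNat ((v.getD i.toNat []).set j.toNat s)

def get_view (data : List String) : List (List String) :=
  let view := List.replicate 5 (List.replicate 5 " ")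
  let st :=
    (PySem.List.pyRange 0 5 1).foldl (fun (st : List (List String) × Int) i =>
      (PySem.List.pyRange 0 5 1).foldl (fun (st : List (List String) × Int) j =>
        if ¬ i = 2 ∧ j = 2 then
          -- try: view[i][j] = data[n]; n += 1 except IndexError: pass
          match PySem.List.pyGet? data st.2 with
          | some s => (pvSetCell st.1 i j s, st.2 + 1)
          | none => st
        else st) st) (view, (0 : Int))
  st.1

-- ===== PORT B =====
def get_view_alt (data : List String) : List (List String) :=
  (PySem.List.enumerate [(0 : Int), 1, 3, 4]).foldl
    (fun (v : List (List String)) (p : Int × Int) =>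
      if p.1 < (data.length : Int) then pvSetCell v p.2 2 (data.getD p.1.toNat " ") else v)
    (List.replicate 5 (List.replicate 5 " "))

-- ===== PRECONDITION & SPEC =====
def Spec_get_view (data : List String) (out : List (List String)) : Prop := out = get_view_alt data
instance (data : List String) (out : List (List String)) : Decidable (Spec_get_view data out) := by unfold Spec_get_view; infer_instance

-- ===== CLAIM (what is proved, stated in full; the proofs are below) =====
def Claim_equal_get_view : Prop := ∀ (data : List String), Dom_get_view data → Spec_get_view data (get_view data)

-- ===== LEMMAS AND PROOFS =====


-- small-index reads on a cons list, used to evaluate both ports' data accesses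
theorem gv_g0 {α : Type} (a : α) (l : List α) : PySem.List.pyGet? (a :: l) 0 = some a := by
  rw [show (0 : Int) = ((0 : Nat) : Int) from rfl, PySem.List.pyGet?_natCast]; rfl
theorem gv_g1 {α : Type} (a b : α) (l : List α) : PySem.List.pyGet? (a :: b :: l) 1 = some b := by
  rw [show (1 : Int) = ((1 : Nat) : Int) from rfl, PySem.List.pyGet?_natCast]; rfl
theorem gv_g2 {α : Type} (a b c : α) (l : List α) : PySem.List.pyGet? (a :: b :: c :: l) 2 = some c := by
  rw [show (2 : Int) = ((2 : Nat) : Int) from rfl, PySem.List.pyGet?_natCast]; rfl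
theorem gv_g3 {α : Type} (a b c d : α) (l : List α) : PySem.List.pyGet? (a :: b :: c :: d :: l) 3 = some d := by
  rw [show (3 : Int) = ((3 : Nat) : Int) from rfl, PySem.List.pyGet?_natCast]; rfl
-- out-of-range reads on short lists: IndexError, i.e. none
theorem gv_n1 {α : Type} (a : α) : PySem.List.pyGet? [a] 1 = none := by
  rw [show (1 : Int) = ((1 : Nat) : Int) from rfl, PySem.List.pyGet?_natCast]; rfl
theorem gv_n2 {α : Type} (a b : α) : PySem.List.pyGet? [a, b] 2 = none := by
  rw [show (2 : Int) = ((2 : Nat) : Int) from rfl, PySem.List.pyGet?_natCast]; rfl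
theorem gv_n3 {α : Type} (a b c : α) : PySem.List.pyGet? [a, b, c] 3 = none := by
  rw [show (3 : Int) = ((3 : Nat) : Int) from rfl, PySem.List.pyGet?_natCast]; rfl

-- ===== VERDICT (by name: the statement is the Claim_ definition above) =====
theorem get_view_spec : Claim_equal_get_view := by
  intro data _
  unfold Spec_get_view
  match data with
  | [] =>
    simp [get_view, get_view_alt, pvSetCell, PySem.List.pyRange, PySem.List.pyGet?,
      PySem.List.enumerate, List.range_succ]
  | [a] =>
    simp [get_view, get_view_alt, pvSetCell, PySem.List.pyRange, PySem.List.enumerate,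
      List.range_succ, gv_g0, gv_n1]
  | [a, b] =>
    simp [get_view, get_view_alt, pvSetCell, PySem.List.pyRange, PySem.List.enumerate,
      List.range_succ, gv_g0, gv_g1, gv_n2]
  | [a, b, c] =>
    simp [get_view, get_view_alt, pvSetCell, PySem.List.pyRange, PySem.List.enumerate,
      List.range_succ, gv_g0, gv_g1, gv_g2, gv_n3]
  | a :: b :: c :: d :: t =>
    have ht : (0 : Int) ≤ (t.length : Int) := Int.natCast_nonneg _
    simp [get_view, get_view_alt, pvSetCell, PySem.List.pyRange, PySem.List.enumerate,
      List.range_succ, gv_g0, gv_g1, gv_g2, gv_g3]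
    split_ifs <;> first | rfl | omega
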